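-- pv_equiv track=rewrite | github.com/KoIIIeY/hackaton2 | python-text-server/src/pipeline.py | pattern_answers
-- ===== SOURCE A (Python) =====
-- def pattern_answers(list_answers):
--     answer = 'Количество возможных причин: ' + str(len(list_answers)) + '.\n\n'
--     if len(list_answers) > 1:
--         for i in range(len(list_answers)):
--             answer += list_answers[i][1].rstrip('.') + '. Возможное решение данной проблемы: ' + list_answers[i][2].rstrip('.') + ';\n\n'
--         return answer.strip()[:-1] + '.'
--
--     elif len(list_answers) == 1:
--         answer += list_answers[0][1].rstrip('.') + '. Возможное решение данной проблемы: ' + list_answers[0][2].rstrip('.') + '.'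
--         return answer.strip()
--     else:
--         return answer.strip()
-- ===== SOURCE B (Python) =====
-- def _body(rows):
--     # formatted entries of the non-empty list rows, separated by ';\n\n' (fold-right recursion)
--     entry = rows[0][1].rstrip('.') + '. Возможное решение данной проблемы: ' + rows[0][2].rstrip('.')
--     rest = rows[1:]
--     if not rest:
--         return entry
--     return entry + ';\n\n' + _body(rest)
--
--
-- def pattern_answers(list_answers):
--     header = 'Количество возможных причин: ' + str(len(list_answers)) + '.'
--     if not list_answers:
--         return header
--     return header + '\n\n' + _body(list_answers) + '.'
-- ===== Notes on version B (the rewrite author's own statement) =====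
-- stated objective: simpler
-- what changed: B replaces A's index loop with trailing separators plus strip()/[:-1] suffix surgery by a fold-right recursion that places ';\n\n' only BETWEEN entries, so no strip, no slicing and no accumulator exist; the three branches collapse to empty/non-empty.
import Mathlib
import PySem

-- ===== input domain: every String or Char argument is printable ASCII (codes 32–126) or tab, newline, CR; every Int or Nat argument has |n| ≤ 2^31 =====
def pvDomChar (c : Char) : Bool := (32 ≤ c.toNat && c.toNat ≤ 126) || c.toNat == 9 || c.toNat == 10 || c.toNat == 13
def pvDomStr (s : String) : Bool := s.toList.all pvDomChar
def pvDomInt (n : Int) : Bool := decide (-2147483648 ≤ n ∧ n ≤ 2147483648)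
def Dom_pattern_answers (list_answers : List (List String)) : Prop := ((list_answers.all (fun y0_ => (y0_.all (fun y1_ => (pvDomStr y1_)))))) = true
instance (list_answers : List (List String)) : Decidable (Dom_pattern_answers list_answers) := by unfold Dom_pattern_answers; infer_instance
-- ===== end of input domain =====

-- B replaces A's index loop with trailing separators plus strip()/[:-1] suffix surgery by a
-- fold-right recursion that puts ';\n\n' only BETWEEN entries (objective: simpler).

-- hand port of Python's s.rstrip('.') (strip ALL trailing '.' characters); exact: dropWhile on the reversed code points
def pvRstripDot (s : String) : String :=
  String.ofList ((s.toList.reverse.dropWhile (fun c => c == '.')).reverse)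

-- ===== PORT A =====
def pattern_answers (list_answers : List (List String)) : String :=
  let answer := "Количество возможных причин: " ++ PySem.Int.toStr (list_answers.length : Int) ++ ".\n\n"
  if list_answers.length > 1 then
    let answer := (PySem.List.pyRange 0 (PySem.List.len list_answers) 1).foldl
      (fun acc i =>
        acc ++ pvRstripDot (PySem.List.pyGetD (PySem.List.pyGetD list_answers i []) 1 "")
            ++ ". Возможное решение данной проблемы: "
            ++ pvRstripDot (PySem.List.pyGetD (PySem.List.pyGetD list_answers i []) 2 "")
            ++ ";\n\n") answer
    (PySem.Str.slice (PySem.Str.strip answer) none (some (-1))) ++ "."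
  else if list_answers.length = 1 then
    PySem.Str.strip (answer
      ++ pvRstripDot (PySem.List.pyGetD (PySem.List.pyGetD list_answers 0 []) 1 "")
      ++ ". Возможное решение данной проблемы: "
      ++ pvRstripDot (PySem.List.pyGetD (PySem.List.pyGetD list_answers 0 []) 2 "")
      ++ ".")
  else
    PySem.Str.strip answer

-- ===== PORT B =====
-- Python _body: recursion on the non-empty list, separator only between entries
-- (the [] case is unreachable from pattern_answers_alt; Python would raise there).
def pvBody : List (List String) → String
  | [] => ""
  | a :: rest =>
    let entry := pvRstripDot (PySem.List.pyGetD a 1 "")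
      ++ ". Возможное решение данной проблемы: "
      ++ pvRstripDot (PySem.List.pyGetD a 2 "")
    match rest with
    | [] => entry
    | b :: l => entry ++ ";\n\n" ++ pvBody (b :: l)

def pattern_answers_alt (list_answers : List (List String)) : String :=
  let header := "Количество возможных причин: " ++ PySem.Int.toStr (list_answers.length : Int) ++ "."
  if list_answers.isEmpty then header
  else header ++ "\n\n" ++ pvBody list_answers ++ "."

-- ===== PRECONDITION & SPEC =====
-- Pre_ excludes exactly the inputs on which the Python A raises IndexError: a row with fewer than 3 elements
-- (A reads row[1] and row[2] of every row).
def Pre_pattern_answers (list_answers : List (List String)) : Prop :=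
  ∀ a ∈ list_answers, 3 ≤ a.length
instance (list_answers : List (List String)) : Decidable (Pre_pattern_answers list_answers) := by
  unfold Pre_pattern_answers; infer_instance
def pvWitness_pattern_answers : List (List String) := [["q", "cause one", "fix one."], ["q", "cause two..", "fix two"]]

def Spec_pattern_answers (list_answers : List (List String)) (out : String) : Prop := out = pattern_answers_alt list_answers
instance (list_answers : List (List String)) (out : String) : Decidable (Spec_pattern_answers list_answers out) := by unfold Spec_pattern_answers; infer_instance

-- ===== CLAIM (what is proved, stated in full; the proofs are below) =====
def Claim_equal_pattern_answers : Prop := ∀ (list_answers : List (List String)), Dom_pattern_answers list_answers → Pre_pattern_answers list_answers → Spec_pattern_answers list_answers (pattern_answers list_answers)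

-- ===== LEMMAS AND PROOFS =====

def pvSep : List Char := [';', '\n', '\n']

-- the per-row text both programs build, used only by the proofs below
def pvEntry (a : List String) : String :=
  pvRstripDot (PySem.List.pyGetD a 1 "")
    ++ ". Возможное решение данной проблемы: "
    ++ pvRstripDot (PySem.List.pyGetD a 2 "")

lemma pv_foldl_toList (xs : List (List String)) :
    ∀ init : String,
      (List.foldl (fun acc a => acc ++ pvEntry a ++ ";\n\n") init xs).toList
        = init.toList ++ (xs.map (fun a => (pvEntry a).toList ++ pvSep)).flatten := by
  induction xs with
  | nil => intro init; simp
  | cons x xs ih =>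
      intro init
      simp only [List.foldl_cons, List.map_cons, List.flatten_cons, ih]
      simp [pvSep]

lemma pv_flatten_join (x : List String) (xs : List (List String)) :
    ((x :: xs).map (fun a => (pvEntry a).toList ++ pvSep)).flatten
      = PySem.Chars.join pvSep ((x :: xs).map (fun a => (pvEntry a).toList)) ++ pvSep := by
  induction xs generalizing x with
  | nil => simp [PySem.Chars.join_singleton]
  | cons y ys ih =>
      rw [show (x :: y :: ys).map (fun a => (pvEntry a).toList ++ pvSep)
            = ((pvEntry x).toList ++ pvSep) :: (y :: ys).map (fun a => (pvEntry a).toList ++ pvSep) from rfl,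
          List.flatten_cons, ih y]
      simp [PySem.Chars.join_cons_cons]

lemma pv_body_toList (x : List String) (xs : List (List String)) :
    (pvBody (x :: xs)).toList
      = PySem.Chars.join pvSep ((x :: xs).map (fun a => (pvEntry a).toList)) := by
  induction xs generalizing x with
  | nil => simp [pvBody, pvEntry, PySem.Chars.join_singleton]
  | cons y ys ih =>
      have hsep : (";\n\n" : String).toList = pvSep := by decide
      simp only [pvBody, List.map_cons]
      rw [PySem.Chars.join_cons_cons]
      simp [ih y, pvEntry, hsep]

lemma pv_lstrip_header (r : List Char) :
    PySem.Chars.lstrip ("Количество возможных причин: ".toList ++ r)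
      = "Количество возможных причин: ".toList ++ r := by
  have h : "Количество возможных причин: ".toList
      = 'К' :: "оличество возможных причин: ".toList := by decide
  have h2 : PySem.Chars.isspace 'К' = false := by decide
  simp [PySem.Chars.lstrip, h, h2]

lemma pv_rstrip_sep (y : List Char) :
    PySem.Chars.rstrip (y ++ pvSep) = y ++ [';'] := by
  simp [PySem.Chars.rstrip, pvSep, PySem.Chars.isspace]

lemma pv_rstrip_dot (y : List Char) :
    PySem.Chars.rstrip (y ++ ['.']) = y ++ ['.'] := by
  simp [PySem.Chars.rstrip, PySem.Chars.isspace]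

lemma pv_str_ext {s t : String} (h : s.toList = t.toList) : s = t := by
  have := congrArg String.ofList h
  simpa using this

-- ===== VERDICT (by name: the statement is the Claim_ definition above) =====
theorem pattern_answers_spec : Claim_equal_pattern_answers := by
  intro xs _ _
  unfold Spec_pattern_answers pattern_answers pattern_answers_alt
  match xs with
  | [] => decide
  | [a] =>
      apply pv_str_ext
      norm_num
      have hd1 : (".\n\n" : String).toList = ['.', '\n', '\n'] := by decide
      have hd3 : ("." : String).toList = ['.'] := by decide
      have hb : (pvBody [a]).toList = (pvEntry a).toList := by
        rw [pv_body_toList]; simp [PySem.Chars.join_singleton]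
      rw [hd1, hd3]
      simp only [PySem.Chars.strip]
      rw [pv_lstrip_header]
      rw [show "Количество возможных причин: ".toList ++
            (PySem.Int.toChars 1 ++
              (['.','\n','\n'] ++
                ((pvRstripDot (PySem.List.pyGetD a 1 "")).toList ++
                  (". Возможное решение данной проблемы: ".toList ++
                    ((pvRstripDot (PySem.List.pyGetD a 2 "")).toList ++ ['.'])))))
            = ("Количество возможных причин: ".toList ++ (PySem.Int.toChars 1 ++ (['.','\n','\n'] ++ (pvEntry a).toList))) ++ ['.'] by simp [pvEntry]]
      rw [pv_rstrip_dot]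
      simp [hb, pvEntry]
  | a :: b :: l =>
      apply pv_str_ext
      norm_num
      have hr : ((l.length : Int) + 1 + 1) = PySem.List.len (a :: b :: l) := by
        simp [PySem.List.len]
      have hfun : (fun (acc : String) i =>
            acc ++ pvRstripDot (PySem.List.pyGetD (PySem.List.pyGetD (a :: b :: l) i []) 1 "") ++
              ". Возможное решение данной проблемы: " ++
              pvRstripDot (PySem.List.pyGetD (PySem.List.pyGetD (a :: b :: l) i []) 2 "") ++ ";\n\n")
          = (fun (acc : String) i => acc ++ pvEntry (PySem.List.pyGetD (a :: b :: l) i []) ++ ";\n\n") := by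
        funext acc i; simp [pvEntry, String.append_assoc]
      rw [hr, hfun, PySem.List.foldl_pyRange_zero_pyGetD (a :: b :: l) []
            (fun acc r => acc ++ pvEntry r ++ ";\n\n")]
      rw [pv_foldl_toList]
      rw [pv_flatten_join]
      have hd1 : (".\n\n" : String).toList = ['.', '\n', '\n'] := by decide
      simp only [String.toList_append, PySem.Int.toList_toStr, hd1, List.append_assoc,
        PySem.Chars.strip]
      rw [pv_lstrip_header]
      rw [show "Количество возможных причин: ".toList ++
            (PySem.Int.toChars (PySem.List.len (a :: b :: l)) ++
              (['.', '\n', '\n'] ++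
                (PySem.Chars.join pvSep (List.map (fun a => (pvEntry a).toList) (a :: b :: l)) ++ pvSep)))
          = ("Количество возможных причин: ".toList ++
              (PySem.Int.toChars (PySem.List.len (a :: b :: l)) ++
                (['.', '\n', '\n'] ++
                  PySem.Chars.join pvSep (List.map (fun a => (pvEntry a).toList) (a :: b :: l))))) ++ pvSep
          by simp]
      rw [pv_rstrip_sep, PySem.List.slice_to_neg_one, List.dropLast_concat]
      have hd2 : ("\n\n" : String).toList = ['\n', '\n'] := by decide
      have hd3 : ("." : String).toList = ['.'] := by decide
      simp [hd2, hd3, pv_body_toList]
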